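-- pv_equiv track=rewrite | github.com/gtklocker/projecteuler | 0115.py | solve
-- ===== SOURCE A (Python) =====
-- def solve(min_l, n):
--     dp = [[0] * n for i in range(n + 1)]
--     for i in range(n - 1, -1, -1):
--         for l in range(n, min_l - 1, -1):
--             if i + l <= n:
--                 dp[l][i] += 1
--
--                 for l1 in range(min_l, n + 1):
--                     for j in range(i + l + 1, n):
--                         dp[l][i] += dp[l1][j]
--
--     return sum([sum(dp[i]) for i in range(n + 1)]) + 1
-- ===== SOURCE B (Python) =====
-- def solve(min_l, n):
--     # Same count, computed with suffix sums: T[k] = total number of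
--     # arrangements of a first block starting at position >= k (summed over all
--     # block lengths), so each cell is 1 + T[start of next block] in O(1).
--     size = n + 2 if n >= 0 else 0
--     T = [0] * size
--     total = 0
--     for i in range(n - 1, -1, -1):
--         s = 0
--         for l in range(min_l, n - i + 1):
--             s += 1 + T[i + l + 1]
--         total += s
--         T[i] = T[i + 1] + s
--     return total + 1
-- ===== Notes on version B (the rewrite author's own statement) =====
-- stated objective: faster
-- what changed: Replaces the 4-deep nested loops (for each cell, re-summing all later dp cells) by a single O(n^2) sweep that maintains a suffix-sum array T, so each cell's value is 1 + T[next start] read in O(1); the dp table itself disappears.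
-- outside the precondition, e.g. on solve(-1, 1): A returns 12, B returns 4; on solve(-6, 2): A raises IndexError, B raises IndexError; on solve(-4, 1): A raises IndexError, B returns 7
import Mathlib
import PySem

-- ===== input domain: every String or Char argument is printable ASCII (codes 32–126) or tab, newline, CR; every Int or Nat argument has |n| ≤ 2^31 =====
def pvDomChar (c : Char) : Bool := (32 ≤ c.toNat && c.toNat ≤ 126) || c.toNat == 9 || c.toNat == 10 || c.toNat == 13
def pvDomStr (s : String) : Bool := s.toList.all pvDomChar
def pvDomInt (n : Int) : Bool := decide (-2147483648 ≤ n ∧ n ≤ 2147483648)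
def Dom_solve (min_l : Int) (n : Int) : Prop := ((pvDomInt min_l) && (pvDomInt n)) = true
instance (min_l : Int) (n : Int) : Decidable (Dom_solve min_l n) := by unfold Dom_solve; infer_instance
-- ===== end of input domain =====

-- B replaces A's four nested loops (each cell re-sums all later dp cells) by one sweep
-- maintaining a suffix-sum array: a structurally different, asymptotically faster exact rewrite.

-- ===== PORT A =====
-- Python `dp[l][i]` read (cell of the 2-D list) and `dp[l][i] += v` (read row,
-- update cell, write row back — functionally what the in-place mutation leaves).
def pvGet2 (dp : List (List Int)) (l i : Int) : Int :=
  PySem.List.pyGetD (PySem.List.pyGetD dp l []) i 0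

def pvAdd2 (dp : List (List Int)) (l i v : Int) : List (List Int) :=
  PySem.List.pySetD dp l
    (PySem.List.pySetD (PySem.List.pyGetD dp l []) i (pvGet2 dp l i + v))

def solve (min_l : Int) (n : Int) : Int :=
  -- dp = [[0] * n for i in range(n + 1)]  ([0]*n is List.replicate n.toNat 0: empty for n ≤ 0, exact)
  let dp0 : List (List Int) :=
    (PySem.List.pyRange 0 (n + 1) 1).map (fun _ => List.replicate n.toNat (0 : Int))
  let dp := (PySem.List.pyRange (n - 1) (-1) (-1)).foldl (fun dp i =>
    (PySem.List.pyRange n (min_l - 1) (-1)).foldl (fun dp l =>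
      if i + l ≤ n then
        let dp := pvAdd2 dp l i 1
        (PySem.List.pyRange min_l (n + 1) 1).foldl (fun dp l1 =>
          (PySem.List.pyRange (i + l + 1) n 1).foldl (fun dp j =>
            pvAdd2 dp l i (pvGet2 dp l1 j)) dp) dp
      else dp) dp) dp0
  ((PySem.List.pyRange 0 (n + 1) 1).map
    (fun i => (PySem.List.pyGetD dp i ([] : List Int)).sum)).sum + 1

-- ===== PORT B =====
def solve_alt (min_l : Int) (n : Int) : Int :=
  let size : Int := if 0 ≤ n then n + 2 else 0
  let T0 : List Int := List.replicate size.toNat (0 : Int)   -- [0] * size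
  let st := (PySem.List.pyRange (n - 1) (-1) (-1)).foldl (fun (st : Int × List Int) i =>
    let s := (PySem.List.pyRange min_l (n - i + 1) 1).foldl
      (fun s l => s + 1 + PySem.List.pyGetD st.2 (i + l + 1) 0) 0
    (st.1 + s, PySem.List.pySetD st.2 i (PySem.List.pyGetD st.2 (i + 1) 0 + s)))
    ((0 : Int), T0)
  st.1 + 1

-- ===== PRECONDITION & SPEC =====
-- Pre_ excludes only min_l < 0 together with n ≥ 1: there A indexes dp with negative
-- block lengths, so it either raises IndexError or reads/writes wrapped-around rows —
-- an artefact of Python's negative list indexing, not a value of the function.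
def Pre_solve (min_l : Int) (n : Int) : Prop := 0 ≤ min_l ∨ n ≤ 0
instance (min_l : Int) (n : Int) : Decidable (Pre_solve min_l n) := by unfold Pre_solve; infer_instance

def pvWitness_solve : Int × Int := (3, 7)

def Spec_solve (min_l : Int) (n : Int) (out : Int) : Prop := out = solve_alt min_l n
instance (min_l : Int) (n : Int) (out : Int) : Decidable (Spec_solve min_l n out) := by unfold Spec_solve; infer_instance

-- ===== CLAIM (what is proved, stated in full; the proofs are below) =====
def Claim_equal_solve : Prop := ∀ (min_l : Int) (n : Int), Dom_solve min_l n → Pre_solve min_l n → Spec_solve min_l n (solve min_l n)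

-- ===== LEMMAS AND PROOFS =====

def pvWf (min_l n : Int) : Nat → Int → Int
  | 0, _ => 0
  | (fuel+1), k =>
    if n ≤ k then 0
    else ((PySem.List.pyRange min_l (n - k + 1) 1).map
            (fun l => 1 + pvWf min_l n fuel (k + l + 1))).sum
         + pvWf min_l n fuel (k + 1)

def pvW (min_l n k : Int) : Int := pvWf min_l n ((n - k).toNat + 1) k

def pvS (min_l n k : Int) : Int :=
  ((PySem.List.pyRange min_l (n - k + 1) 1).map (fun l => 1 + pvW min_l n (k + l + 1))).sum

def pvFA (min_l n l i : Int) : Int :=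
  if min_l ≤ l ∧ i + l ≤ n then 1 + pvW min_l n (i + l + 1) else 0

lemma pvWf_stable (min_l n : Int) (hm : 0 ≤ min_l) :
    ∀ d f1 f2 k, (n - k).toNat ≤ d → d < f1 → d < f2 →
      pvWf min_l n f1 k = pvWf min_l n f2 k := by
  intro d
  induction d with
  | zero =>
    intro f1 f2 k hd h1 h2
    match f1, f2 with
    | a+1, b+1 =>
      have hk : n ≤ k := by omega
      simp [pvWf, hk]
  | succ d ih =>
    intro f1 f2 k hd h1 h2
    match f1, f2 with
    | a+1, b+1 =>
      by_cases hk : n ≤ k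
      · simp [pvWf, hk]
      · simp only [pvWf, if_neg hk]
        congr 1
        · congr 1
          apply List.map_congr_left
          intro l hl
          rw [PySem.List.mem_pyRange_one] at hl
          congr 1
          exact ih a b (k + l + 1) (by omega) (by omega) (by omega)
        · exact ih a b (k + 1) (by omega) (by omega) (by omega)

lemma pvW_of_le (min_l n k : Int) (h : n ≤ k) : pvW min_l n k = 0 := by
  simp [pvW, pvWf, h]

lemma pvWf_eq_pvW (min_l n : Int) (hm : 0 ≤ min_l) (f : Nat) (k : Int)
    (h : (n - k).toNat < f) : pvWf min_l n f k = pvW min_l n k :=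
  pvWf_stable min_l n hm (n - k).toNat f ((n - k).toNat + 1) k le_rfl h (by omega)

lemma pvW_step (min_l n : Int) (hm : 0 ≤ min_l) (k : Int) (h : k < n) :
    pvW min_l n k = pvS min_l n k + pvW min_l n (k + 1) := by
  have hd : 1 ≤ (n - k).toNat := by omega
  unfold pvW
  obtain ⟨d, hdd⟩ : ∃ d, (n - k).toNat = d + 1 := ⟨(n - k).toNat - 1, by omega⟩
  rw [hdd]
  simp only [pvWf, if_neg (by omega : ¬ n ≤ k)]
  congr 1
  · unfold pvS
    congr 1
    apply List.map_congr_left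
    intro l hl
    rw [PySem.List.mem_pyRange_one] at hl
    congr 1
    exact pvWf_eq_pvW min_l n hm (d+1) (k+l+1) (by omega)
  · exact pvWf_eq_pvW min_l n hm (d+1) (k+1) (by omega)

lemma Ico_insert_left (a b : Int) (h : a < b) :
    Finset.Ico a b = insert a (Finset.Ico (a + 1) b) := by
  ext x; simp [Finset.mem_Ico, Finset.mem_insert]; omega

lemma sumPR_eq_Ico (f : Int → Int) (a b : Int) :
    ((PySem.List.pyRange a b 1).map f).sum = ∑ x ∈ Finset.Ico a b, f x := by
  obtain ⟨d, hd⟩ : ∃ d : Nat, (b - a).toNat = d := ⟨_, rfl⟩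
  induction d generalizing a with
  | zero =>
    rw [PySem.List.pyRange_one_eq_nil (by omega), Finset.Ico_eq_empty (by omega)]; simp
  | succ d ih =>
    rw [PySem.List.pyRange_one_cons (by omega), Ico_insert_left a b (by omega)]
    rw [List.map_cons, List.sum_cons, Finset.sum_insert (by simp)]
    rw [ih (a + 1) (by omega)]

lemma sum_fA_eq_pvS (min_l n : Int) (j : Int) (hj : 0 ≤ j) :
    ∑ l ∈ Finset.Ico min_l (n + 1), pvFA min_l n l j = pvS min_l n j := by
  rw [pvS, sumPR_eq_Ico]
  rw [← Finset.sum_subset (Finset.Ico_subset_Ico le_rfl (by omega : n - j + 1 ≤ n + 1))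
      (fun x hx hx2 => by
        simp only [Finset.mem_Ico] at hx hx2
        simp only [pvFA]
        rw [if_neg]; omega)]
  apply Finset.sum_congr rfl
  intro l hl
  simp only [Finset.mem_Ico] at hl
  simp only [pvFA, if_pos (by omega : min_l ≤ l ∧ j + l ≤ n)]

lemma sum_pvS_eq_pvW (min_l n : Int) (hm : 0 ≤ min_l) (k : Int) :
    ∑ j ∈ Finset.Ico k n, pvS min_l n j = pvW min_l n k := by
  obtain ⟨d, hd⟩ : ∃ d : Nat, (n - k).toNat = d := ⟨_, rfl⟩
  induction d generalizing k with
  | zero =>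
    rw [Finset.Ico_eq_empty (by omega), pvW_of_le min_l n k (by omega)]; simp
  | succ d ih =>
    rw [Ico_insert_left k n (by omega), Finset.sum_insert (by simp),
        pvW_step min_l n hm k (by omega), ih (k + 1) (by omega)]

lemma double_sum_fA (min_l n : Int) (hm : 0 ≤ min_l) (k : Int) (hk : 0 ≤ k) :
    ∑ l1 ∈ Finset.Ico min_l (n + 1), ∑ j ∈ Finset.Ico k n, pvFA min_l n l1 j
      = pvW min_l n k := by
  rw [Finset.sum_comm]
  rw [← sum_pvS_eq_pvW min_l n hm k]
  apply Finset.sum_congr rfl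
  intro j hj
  simp only [Finset.mem_Ico] at hj
  exact sum_fA_eq_pvS min_l n j (by omega)

lemma set_map_range {α : Type} (m k : Nat) (f : Nat → α) (v : α) (hk : k < m) :
    ((List.range m).map f).set k v = (List.range m).map (fun j => if j = k then v else f j) := by
  apply List.ext_getElem
  · simp
  · intro j h1 h2
    simp only [List.length_map, List.length_range] at h1 h2
    rw [List.getElem_set]
    simp only [List.getElem_map, List.getElem_range]
    by_cases hjk : j = k
    · subst hjk; simp
    · simp [hjk, Ne.symm hjk]

def pvCanon (n : Int) (g : Int → Int → Int) : List (List Int) :=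
  (List.range (n + 1).toNat).map
    (fun (l : Nat) => (List.range n.toNat).map (fun (i : Nat) => g (l : Int) (i : Int)))

def pvUpd (g : Int → Int → Int) (l i v : Int) : Int → Int → Int :=
  fun l' i' => if l' = l ∧ i' = i then v else g l' i'

lemma pvCanon_congr (n : Int) (g g' : Int → Int → Int)
    (h : ∀ l i : Int, 0 ≤ l → l ≤ n → 0 ≤ i → i < n → g l i = g' l i) :
    pvCanon n g = pvCanon n g' := by
  unfold pvCanon
  apply List.map_congr_left
  intro l hl
  rw [List.mem_range] at hl
  apply List.map_congr_left
  intro i hi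
  rw [List.mem_range] at hi
  exact h l i (by omega) (by omega) (by omega) (by omega)

lemma pvGet2_canon (n : Int) (g : Int → Int → Int) (l i : Int)
    (hl : 0 ≤ l) (hln : l ≤ n) (hi : 0 ≤ i) (hin : i < n) :
    pvGet2 (pvCanon n g) l i = g l i := by
  obtain ⟨lm, rfl⟩ : ∃ m : Nat, l = (m : Int) := ⟨l.toNat, (Int.toNat_of_nonneg hl).symm⟩
  obtain ⟨im, rfl⟩ : ∃ m : Nat, i = (m : Int) := ⟨i.toNat, (Int.toNat_of_nonneg hi).symm⟩
  unfold pvGet2 pvCanon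
  rw [PySem.List.pyGetD_natCast, PySem.List.pyGetD_natCast]
  have hrow : ((List.range (n + 1).toNat).map
      (fun (l : Nat) => (List.range n.toNat).map (fun (i : Nat) => g (l : Int) (i : Int)))).getD lm []
      = (List.range n.toNat).map (fun (i : Nat) => g (lm : Int) (i : Int)) := by
    rw [List.getD_eq_getElem _ _ (by simp; omega)]
    simp only [List.getElem_map, List.getElem_range]
  rw [hrow, List.getD_eq_getElem _ _ (by simp; omega)]
  simp only [List.getElem_map, List.getElem_range]

lemma pvAdd2_canon (n : Int) (g : Int → Int → Int) (l i v : Int)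
    (hl : 0 ≤ l) (hln : l ≤ n) (hi : 0 ≤ i) (hin : i < n) :
    pvAdd2 (pvCanon n g) l i v = pvCanon n (pvUpd g l i (g l i + v)) := by
  obtain ⟨lm, rfl⟩ : ∃ m : Nat, l = (m : Int) := ⟨l.toNat, (Int.toNat_of_nonneg hl).symm⟩
  obtain ⟨im, rfl⟩ : ∃ m : Nat, i = (m : Int) := ⟨i.toNat, (Int.toNat_of_nonneg hi).symm⟩
  unfold pvAdd2
  rw [pvGet2_canon n g _ _ hl hln hi hin]
  unfold pvCanon
  rw [PySem.List.pyGetD_natCast, PySem.List.pySetD_natCast, PySem.List.pySetD_natCast]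
  have hrow : ((List.range (n + 1).toNat).map
      (fun (l : Nat) => (List.range n.toNat).map (fun (i : Nat) => g (l : Int) (i : Int)))).getD lm []
      = (List.range n.toNat).map (fun (i : Nat) => g (lm : Int) (i : Int)) := by
    rw [List.getD_eq_getElem _ _ (by simp; omega)]
    simp only [List.getElem_map, List.getElem_range]
  rw [hrow]
  rw [set_map_range _ im _ _ (by omega), set_map_range _ lm _ _ (by omega)]
  apply List.map_congr_left
  intro l' hl'
  rw [List.mem_range] at hl'
  by_cases h : l' = lm
  · subst h
    rw [if_pos rfl]
    apply List.map_congr_left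
    intro i' hi'
    rw [List.mem_range] at hi'
    unfold pvUpd
    by_cases h2 : i' = im
    · subst h2; rw [if_pos rfl, if_pos ⟨rfl, rfl⟩]
    · rw [if_neg h2, if_neg (by simp; omega)]
  · rw [if_neg h]
    apply List.map_congr_left
    intro i' hi'
    unfold pvUpd
    rw [if_neg (by simp; omega)]

lemma pvUpd_upd (g : Int → Int → Int) (l i v w : Int) :
    pvUpd (pvUpd g l i v) l i w = pvUpd g l i w := by
  funext l' i'
  unfold pvUpd
  by_cases h : l' = l ∧ i' = i
  · rw [if_pos h, if_pos h]
  · rw [if_neg h, if_neg h, if_neg h]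

lemma pvUpd_same (g : Int → Int → Int) (l i v : Int) : pvUpd g l i v l i = v := by
  unfold pvUpd; rw [if_pos ⟨rfl, rfl⟩]

lemma pvUpd_trivial (g : Int → Int → Int) (l i : Int) : pvUpd g l i (g l i) = g := by
  funext l' i'
  unfold pvUpd
  by_cases h : l' = l ∧ i' = i
  · obtain ⟨h1, h2⟩ := h; subst h1; subst h2; rw [if_pos ⟨rfl, rfl⟩]
  · rw [if_neg h]

lemma pvRow (n : Int) (g : Int → Int → Int) (l : Int) (hl : 0 ≤ l) (hln : l ≤ n) :
    PySem.List.pyGetD (pvCanon n g) l [] =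
      (List.range n.toNat).map (fun (i : Nat) => g l (i : Int)) := by
  obtain ⟨lm, rfl⟩ : ∃ m : Nat, l = (m : Int) := ⟨l.toNat, (Int.toNat_of_nonneg hl).symm⟩
  unfold pvCanon
  rw [PySem.List.pyGetD_natCast, List.getD_eq_getElem _ _ (by simp; omega)]
  simp only [List.getElem_map, List.getElem_range]

lemma range_cast_eq_pyRange (m : Nat) :
    PySem.List.pyRange 0 (m : Int) 1 = (List.range m).map (fun (k : Nat) => (k : Int)) := by
  rw [PySem.List.pyRange_one]
  simp

lemma sum_range_map (m : Nat) (f : Int → Int) :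
    ((List.range m).map (fun (k : Nat) => f (k : Int))).sum
      = ∑ x ∈ Finset.Ico (0 : Int) (m : Int), f x := by
  rw [← sumPR_eq_Ico, range_cast_eq_pyRange, List.map_map]
  rfl

lemma canon_result (n : Int) (hn : 0 ≤ n) (g : Int → Int → Int) :
    ((PySem.List.pyRange 0 (n + 1) 1).map
        (fun i => (PySem.List.pyGetD (pvCanon n g) i ([] : List Int)).sum)).sum
      = ∑ l ∈ Finset.Ico (0 : Int) (n + 1), ∑ i ∈ Finset.Ico (0 : Int) n, g l i := by
  rw [sumPR_eq_Ico]
  apply Finset.sum_congr rfl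
  intro l hl
  simp only [Finset.mem_Ico] at hl
  rw [pvRow n g l (by omega) (by omega), sum_range_map n.toNat (fun i => g l i),
      Int.toNat_of_nonneg hn]

lemma inner_fold (min_l n i l l1 : Int) (hm : 0 ≤ min_l)
    (hi : 0 ≤ i) (hin : i < n) (hl : min_l ≤ l) (hln : l ≤ n)
    (hl1 : min_l ≤ l1) (hl1n : l1 ≤ n) :
    ∀ (a : Int) (g : Int → Int → Int), i < a →
    (∀ l' i', 0 ≤ l' → l' ≤ n → i < i' → i' < n → g l' i' = pvFA min_l n l' i') →
    (PySem.List.pyRange a n 1).foldl (fun dp j => pvAdd2 dp l i (pvGet2 dp l1 j)) (pvCanon n g)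
      = pvCanon n (pvUpd g l i (g l i + ∑ j ∈ Finset.Ico a n, pvFA min_l n l1 j)) := by
  intro a g ha hg
  obtain ⟨d, hd⟩ : ∃ d : Nat, (n - a).toNat = d := ⟨_, rfl⟩
  induction d generalizing a g with
  | zero =>
    rw [PySem.List.pyRange_one_eq_nil (by omega), Finset.Ico_eq_empty (by omega)]
    simp only [List.foldl_nil, Finset.sum_empty, add_zero, pvUpd_trivial]
  | succ d ih =>
    rw [PySem.List.pyRange_one_cons (by omega), List.foldl_cons]
    rw [pvGet2_canon n g l1 a (by omega) hl1n (by omega) (by omega)]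
    rw [hg l1 a (by omega) hl1n (by omega) (by omega)]
    rw [pvAdd2_canon n g l i _ (by omega) hln hi hin]
    rw [ih (a + 1)
        (pvUpd g l i (g l i + pvFA min_l n l1 a))
        (by omega)
        (fun l' i' h1 h2 h3 h4 => by
          unfold pvUpd
          rw [if_neg (by omega)]
          exact hg l' i' h1 h2 h3 h4)
        (by omega)]
    rw [pvUpd_same, pvUpd_upd]
    rw [Ico_insert_left a n (by omega), Finset.sum_insert (by simp), add_assoc]

lemma mid_fold (min_l n i l : Int) (hm : 0 ≤ min_l)
    (hi : 0 ≤ i) (hin : i < n) (hl : min_l ≤ l) (hln : l ≤ n) :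
    ∀ (b : Int) (g : Int → Int → Int), min_l ≤ b →
    (∀ l' i', 0 ≤ l' → l' ≤ n → i < i' → i' < n → g l' i' = pvFA min_l n l' i') →
    (PySem.List.pyRange b (n + 1) 1).foldl
        (fun dp l1 => (PySem.List.pyRange (i + l + 1) n 1).foldl
          (fun dp j => pvAdd2 dp l i (pvGet2 dp l1 j)) dp) (pvCanon n g)
      = pvCanon n (pvUpd g l i (g l i +
          ∑ l1 ∈ Finset.Ico b (n + 1), ∑ j ∈ Finset.Ico (i + l + 1) n, pvFA min_l n l1 j)) := by
  intro b g hb hg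
  obtain ⟨d, hd⟩ : ∃ d : Nat, (n + 1 - b).toNat = d := ⟨_, rfl⟩
  induction d generalizing b g with
  | zero =>
    rw [show PySem.List.pyRange b (n + 1) 1 = [] from PySem.List.pyRange_one_eq_nil (by omega),
        Finset.Ico_eq_empty (by omega)]
    simp only [List.foldl_nil, Finset.sum_empty, add_zero, pvUpd_trivial]
  | succ d ih =>
    rw [show PySem.List.pyRange b (n + 1) 1 = b :: PySem.List.pyRange (b + 1) (n + 1) 1 from
          PySem.List.pyRange_one_cons (by omega), List.foldl_cons]
    rw [inner_fold min_l n i l b hm hi hin hl hln hb (by omega) (i + l + 1) g (by omega) hg]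
    rw [ih (b + 1)
        (pvUpd g l i (g l i + ∑ j ∈ Finset.Ico (i + l + 1) n, pvFA min_l n b j))
        (by omega)
        (fun l' i' h1 h2 h3 h4 => by
          unfold pvUpd
          rw [if_neg (by omega)]
          exact hg l' i' h1 h2 h3 h4)
        (by omega)]
    rw [pvUpd_same, pvUpd_upd]
    rw [Ico_insert_left b (n + 1) (by omega), Finset.sum_insert (by simp), add_assoc]

def pvH (min_l n i lb : Int) : Int → Int → Int :=
  fun l' i' => if i < i' ∨ (i' = i ∧ lb ≤ l') then pvFA min_l n l' i' else 0

lemma pvH_shift (min_l n i lb : Int) (hlb : lb ≤ min_l) :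
    pvCanon n (pvH min_l n i lb) = pvCanon n (pvH min_l n i min_l) := by
  apply pvCanon_congr
  intro l' i' b1 b2 b3 b4
  simp only [pvH, pvFA]
  split_ifs <;>
      first
        | rfl
        | (exfalso; omega)
        | (congr 1 <;> first | rfl | omega | (congr 1 <;> omega))
        | ring

lemma pvH_hg (min_l n i lb : Int) :
    ∀ l' i', 0 ≤ l' → l' ≤ n → i < i' → i' < n →
      pvH min_l n i lb l' i' = pvFA min_l n l' i' := by
  intro l' i' _ _ h3 _
  unfold pvH
  rw [if_pos (Or.inl h3)]

lemma l_fold (min_l n i : Int) (hm : 0 ≤ min_l) (hi : 0 ≤ i) (hin : i < n) :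
    ∀ (lb : Int), lb ≤ n →
    (PySem.List.pyRange lb (min_l - 1) (-1)).foldl (fun dp l =>
      if i + l ≤ n then
        (PySem.List.pyRange min_l (n + 1) 1).foldl (fun dp l1 =>
          (PySem.List.pyRange (i + l + 1) n 1).foldl (fun dp j =>
            pvAdd2 dp l i (pvGet2 dp l1 j)) dp) (pvAdd2 dp l i 1)
      else dp) (pvCanon n (pvH min_l n i (lb + 1)))
      = pvCanon n (pvH min_l n i min_l) := by
  intro lb hlbn
  obtain ⟨d, hd⟩ : ∃ d : Nat, (lb - (min_l - 1)).toNat = d := ⟨_, rfl⟩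
  induction d generalizing lb with
  | zero =>
    rw [show PySem.List.pyRange lb (min_l - 1) (-1) = [] from
          PySem.List.pyRange_neg_one_eq_nil (by omega)]
    rw [List.foldl_nil]
    exact pvH_shift min_l n i (lb + 1) (by omega)
  | succ d ih =>
    rw [show PySem.List.pyRange lb (min_l - 1) (-1)
          = lb :: PySem.List.pyRange (lb - 1) (min_l - 1) (-1) from
          PySem.List.pyRange_neg_one_cons (by omega), List.foldl_cons]
    have hstep :
        (if i + lb ≤ n then
          List.foldl (fun dp l1 =>
            List.foldl (fun dp j => pvAdd2 dp lb i (pvGet2 dp l1 j)) dp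
              (PySem.List.pyRange (i + lb + 1) n 1))
            (pvAdd2 (pvCanon n (pvH min_l n i (lb + 1))) lb i 1)
            (PySem.List.pyRange min_l (n + 1) 1)
        else pvCanon n (pvH min_l n i (lb + 1)))
          = pvCanon n (pvH min_l n i lb) := by
      by_cases hc : i + lb ≤ n
      · rw [if_pos hc]
        rw [pvAdd2_canon n _ lb i 1 (by omega) (by omega) hi hin]
        rw [mid_fold min_l n i lb hm hi hin (by omega) (by omega) min_l
            (pvUpd (pvH min_l n i (lb + 1)) lb i (pvH min_l n i (lb + 1) lb i + 1))
            le_rfl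
            (fun l' i' h1 h2 h3 h4 => by
              unfold pvUpd
              rw [if_neg (by omega)]
              exact pvH_hg min_l n i (lb + 1) l' i' h1 h2 h3 h4)]
        rw [pvUpd_same, pvUpd_upd]
        rw [double_sum_fA min_l n hm (i + lb + 1) (by omega)]
        apply pvCanon_congr
        intro l' i' b1 b2 b3 b4
        simp only [pvUpd, pvH, pvFA]
        split_ifs <;>
      first
        | rfl
        | (exfalso; omega)
        | (congr 1 <;> first | rfl | omega | (congr 1 <;> omega))
        | ring
      · rw [if_neg hc]
        apply pvCanon_congr
        intro l' i' b1 b2 b3 b4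
        simp only [pvH, pvFA]
        split_ifs <;>
      first
        | rfl
        | (exfalso; omega)
        | (congr 1 <;> first | rfl | omega | (congr 1 <;> omega))
        | ring
    rw [hstep]
    have := ih (lb - 1) (by omega) (by omega)
    rw [show lb - 1 + 1 = lb from by ring] at this
    exact this

def pvG (min_l n i0 : Int) : Int → Int → Int :=
  fun l' i' => if i0 ≤ i' then pvFA min_l n l' i' else 0

lemma outer_fold (min_l n : Int) (hm : 0 ≤ min_l) :
    ∀ (i0 : Int), -1 ≤ i0 → i0 ≤ n - 1 →
    (PySem.List.pyRange i0 (-1) (-1)).foldl (fun dp i =>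
      (PySem.List.pyRange n (min_l - 1) (-1)).foldl (fun dp l =>
        if i + l ≤ n then
          (PySem.List.pyRange min_l (n + 1) 1).foldl (fun dp l1 =>
            (PySem.List.pyRange (i + l + 1) n 1).foldl (fun dp j =>
              pvAdd2 dp l i (pvGet2 dp l1 j)) dp) (pvAdd2 dp l i 1)
        else dp) dp) (pvCanon n (pvG min_l n (i0 + 1)))
      = pvCanon n (pvG min_l n 0) := by
  intro i0 h1 h2
  obtain ⟨d, hd⟩ : ∃ d : Nat, (i0 + 1).toNat = d := ⟨_, rfl⟩
  induction d generalizing i0 with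
  | zero =>
    rw [show PySem.List.pyRange i0 (-1) (-1) = [] from
          PySem.List.pyRange_neg_one_eq_nil (by omega), List.foldl_nil]
    rw [show i0 + 1 = 0 from by omega]
  | succ d ih =>
    rw [show PySem.List.pyRange i0 (-1) (-1) = i0 :: PySem.List.pyRange (i0 - 1) (-1) (-1) from
          PySem.List.pyRange_neg_one_cons (by omega), List.foldl_cons]
    beta_reduce
    have hG : pvCanon n (pvG min_l n (i0 + 1)) = pvCanon n (pvH min_l n i0 (n + 1)) := by
      apply pvCanon_congr
      intro l' i' b1 b2 b3 b4
      simp only [pvG, pvH, pvFA]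
      split_ifs <;>
      first
        | rfl
        | (exfalso; omega)
        | (congr 1 <;> first | rfl | omega | (congr 1 <;> omega))
        | ring
    rw [hG]
    rw [l_fold min_l n i0 hm (by omega) (by omega) n (le_refl n)]
    have hG2 : pvCanon n (pvH min_l n i0 min_l) = pvCanon n (pvG min_l n (i0 - 1 + 1)) := by
      apply pvCanon_congr
      intro l' i' b1 b2 b3 b4
      simp only [pvG, pvH, pvFA]
      split_ifs <;>
      first
        | rfl
        | (exfalso; omega)
        | (congr 1 <;> first | rfl | omega | (congr 1 <;> omega))
        | ring
    rw [hG2]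
    exact ih (i0 - 1) (by omega) (by omega) (by omega)

lemma dp0_eq_canon (min_l n : Int) (hn : 1 ≤ n) :
    (PySem.List.pyRange 0 (n + 1) 1).map (fun _ => List.replicate n.toNat (0 : Int))
      = pvCanon n (pvG min_l n (n - 1 + 1)) := by
  rw [show (n : Int) + 1 = (((n + 1).toNat : Nat) : Int) from by omega,
      range_cast_eq_pyRange, List.map_map]
  unfold pvCanon
  apply List.map_congr_left
  intro l hl
  apply List.ext_getElem
  · simp
  · intro k hk1 hk2
    simp only [Function.comp_apply, List.getElem_replicate, List.getElem_map, List.getElem_range]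
    unfold pvG
    rw [if_neg (by simp at hk1 ⊢; omega)]

lemma solve_eq (min_l n : Int) (hm : 0 ≤ min_l) (hn : 1 ≤ n) :
    solve min_l n = pvW min_l n 0 + 1 := by
  show ((PySem.List.pyRange 0 (n + 1) 1).map
    (fun i => (PySem.List.pyGetD
      ((PySem.List.pyRange (n - 1) (-1) (-1)).foldl (fun dp i =>
        (PySem.List.pyRange n (min_l - 1) (-1)).foldl (fun dp l =>
          if i + l ≤ n then
            (PySem.List.pyRange min_l (n + 1) 1).foldl (fun dp l1 =>
              (PySem.List.pyRange (i + l + 1) n 1).foldl (fun dp j =>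
                pvAdd2 dp l i (pvGet2 dp l1 j)) dp) (pvAdd2 dp l i 1)
          else dp) dp)
        ((PySem.List.pyRange 0 (n + 1) 1).map (fun _ => List.replicate n.toNat (0 : Int))))
      i ([] : List Int)).sum)).sum + 1 = pvW min_l n 0 + 1
  rw [dp0_eq_canon min_l n hn]
  rw [outer_fold min_l n hm (n - 1) (by omega) le_rfl]
  rw [canon_result n (by omega) (pvG min_l n 0)]
  congr 1
  rw [Finset.sum_comm]
  rw [← sum_pvS_eq_pvW min_l n hm 0]
  apply Finset.sum_congr rfl
  intro i hi
  simp only [Finset.mem_Ico] at hi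
  rw [← sum_fA_eq_pvS min_l n i (by omega)]
  rw [← Finset.sum_subset (Finset.Ico_subset_Ico hm le_rfl)
      (fun x hx hx2 => by
        simp only [Finset.mem_Ico] at hx hx2
        unfold pvG pvFA
        rw [if_pos (by omega), if_neg (by omega)])]
  apply Finset.sum_congr rfl
  intro l hl
  simp only [Finset.mem_Ico] at hl
  unfold pvG
  rw [if_pos (by omega)]

def pvTC (n : Int) (u : Int → Int) : List Int :=
  (List.range (n + 2).toNat).map (fun (k : Nat) => u (k : Int))

def pvU (min_l n i0 : Int) : Int → Int :=
  fun k => if i0 < k then pvW min_l n k else 0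

lemma pvTC_get (n : Int) (u : Int → Int) (k : Int) (hk : 0 ≤ k) (hk2 : k < n + 2) :
    PySem.List.pyGetD (pvTC n u) k 0 = u k := by
  obtain ⟨km, rfl⟩ : ∃ m : Nat, k = (m : Int) := ⟨k.toNat, (Int.toNat_of_nonneg hk).symm⟩
  unfold pvTC
  rw [PySem.List.pyGetD_natCast, List.getD_eq_getElem _ _ (by simp; omega)]
  simp only [List.getElem_map, List.getElem_range]

lemma pvTC_set (n : Int) (u : Int → Int) (k v : Int) (hk : 0 ≤ k) (hk2 : k < n + 2) :
    PySem.List.pySetD (pvTC n u) k v = pvTC n (fun k' => if k' = k then v else u k') := by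
  obtain ⟨km, rfl⟩ : ∃ m : Nat, k = (m : Int) := ⟨k.toNat, (Int.toNat_of_nonneg hk).symm⟩
  unfold pvTC
  rw [PySem.List.pySetD_natCast, set_map_range _ km _ _ (by omega)]
  apply List.map_congr_left
  intro j hj
  beta_reduce
  by_cases h : j = km
  · subst h; rw [if_pos rfl, if_pos rfl]
  · rw [if_neg h, if_neg (by omega)]

lemma pvTC_congr (n : Int) (u u' : Int → Int)
    (h : ∀ k : Int, 0 ≤ k → k < n + 2 → u k = u' k) : pvTC n u = pvTC n u' := by
  unfold pvTC
  apply List.map_congr_left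
  intro k hk
  rw [List.mem_range] at hk
  exact h k (by omega) (by omega)

lemma alt_fold (min_l n : Int) (hm : 0 ≤ min_l) :
    ∀ (i0 : Int), -1 ≤ i0 → i0 ≤ n - 1 →
    ((PySem.List.pyRange i0 (-1) (-1)).foldl (fun (st : Int × List Int) i =>
      (st.1 + (PySem.List.pyRange min_l (n - i + 1) 1).foldl
          (fun s l => s + 1 + PySem.List.pyGetD st.2 (i + l + 1) 0) 0,
        PySem.List.pySetD st.2 i (PySem.List.pyGetD st.2 (i + 1) 0 +
          (PySem.List.pyRange min_l (n - i + 1) 1).foldl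
            (fun s l => s + 1 + PySem.List.pyGetD st.2 (i + l + 1) 0) 0)))
      (pvW min_l n (i0 + 1), pvTC n (pvU min_l n i0)))
      = (pvW min_l n 0, pvTC n (pvU min_l n (-1))) := by
  intro i0 h1 h2
  obtain ⟨d, hd⟩ : ∃ d : Nat, (i0 + 1).toNat = d := ⟨_, rfl⟩
  induction d generalizing i0 with
  | zero =>
    rw [show PySem.List.pyRange i0 (-1) (-1) = [] from
          PySem.List.pyRange_neg_one_eq_nil (by omega), List.foldl_nil]
    rw [show i0 = -1 from by omega]
    norm_num
  | succ d ih =>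
    rw [show PySem.List.pyRange i0 (-1) (-1) = i0 :: PySem.List.pyRange (i0 - 1) (-1) (-1) from
          PySem.List.pyRange_neg_one_cons (by omega), List.foldl_cons]
    beta_reduce
    have hs : (PySem.List.pyRange min_l (n - i0 + 1) 1).foldl
        (fun s l => s + 1 + PySem.List.pyGetD (pvTC n (pvU min_l n i0)) (i0 + l + 1) 0) 0
        = pvS min_l n i0 := by
      have hcg : (PySem.List.pyRange min_l (n - i0 + 1) 1).foldl
          (fun s l => s + 1 + PySem.List.pyGetD (pvTC n (pvU min_l n i0)) (i0 + l + 1) 0) 0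
          = (PySem.List.pyRange min_l (n - i0 + 1) 1).foldl
            (fun s l => s + (1 + pvW min_l n (i0 + l + 1))) 0 :=
 by
        apply PySem.List.foldl_congr_mem
        intro acc x hx
        rw [PySem.List.mem_pyRange_one] at hx
        rw [pvTC_get n _ (i0 + x + 1) (by omega) (by omega)]
        show acc + 1 + pvU min_l n i0 (i0 + x + 1) = _
        unfold pvU
        rw [if_pos (by omega)]
        ring
      rw [hcg, PySem.List.foldl_add, zero_add]
      rfl
    rw [hs]
    rw [pvTC_get n _ (i0 + 1) (by omega) (by omega)]
    rw [show pvU min_l n i0 (i0 + 1) = pvW min_l n (i0 + 1) from by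
          unfold pvU; rw [if_pos (by omega)]]
    rw [pvTC_set n _ i0 _ (by omega) (by omega)]
    have hT : pvTC n (fun k' => if k' = i0 then pvW min_l n (i0 + 1) + pvS min_l n i0
              else pvU min_l n i0 k') = pvTC n (pvU min_l n (i0 - 1)) := by
      apply pvTC_congr
      intro k hk hk2
      unfold pvU
      by_cases h : k = i0
      · subst h
        rw [if_pos rfl, if_pos (by omega)]
        rw [pvW_step min_l n hm k (by omega)]
        ring
      · rw [if_neg h]
        split_ifs <;> first | rfl | (exfalso; omega)
    rw [hT]
    rw [show pvW min_l n (i0 + 1) + pvS min_l n i0 = pvW min_l n (i0 - 1 + 1) from by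
          rw [show i0 - 1 + 1 = i0 from by ring, pvW_step min_l n hm i0 (by omega)]; ring]
    exact ih (i0 - 1) (by omega) (by omega) (by omega)

lemma T0_eq (min_l n : Int) (hn : 1 ≤ n) :
    List.replicate (n + 2).toNat (0 : Int) = pvTC n (pvU min_l n (n - 1)) := by
  unfold pvTC
  apply List.ext_getElem
  · simp
  · intro k h1 h2
    simp only [List.getElem_replicate, List.getElem_map, List.getElem_range]
    unfold pvU
    split_ifs with h
    · rw [pvW_of_le min_l n _ (by omega)]
    · rfl

lemma solve_alt_eq (min_l n : Int) (hm : 0 ≤ min_l) (hn : 1 ≤ n) :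
    solve_alt min_l n = pvW min_l n 0 + 1 := by
  show ((PySem.List.pyRange (n - 1) (-1) (-1)).foldl (fun (st : Int × List Int) i =>
      (st.1 + (PySem.List.pyRange min_l (n - i + 1) 1).foldl
          (fun s l => s + 1 + PySem.List.pyGetD st.2 (i + l + 1) 0) 0,
        PySem.List.pySetD st.2 i (PySem.List.pyGetD st.2 (i + 1) 0 +
          (PySem.List.pyRange min_l (n - i + 1) 1).foldl
            (fun s l => s + 1 + PySem.List.pyGetD st.2 (i + l + 1) 0) 0)))
      ((0 : Int), List.replicate (if (0 : Int) ≤ n then n + 2 else 0).toNat (0 : Int))).1 + 1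
      = pvW min_l n 0 + 1
  rw [if_pos (by omega : (0 : Int) ≤ n)]
  rw [T0_eq min_l n hn]
  rw [show ((0 : Int), pvTC n (pvU min_l n (n - 1)))
        = (pvW min_l n (n - 1 + 1), pvTC n (pvU min_l n (n - 1))) from by
        rw [show n - 1 + 1 = n from by ring, pvW_of_le min_l n n le_rfl]]
  rw [alt_fold min_l n hm (n - 1) (by omega) le_rfl]

lemma pyGetD_all_nil (xs : List (List Int)) (i : Int)
    (h : ∀ r ∈ xs, r = ([] : List Int)) :
    PySem.List.pyGetD xs i [] = [] := by
  cases hx : PySem.List.pyGet? xs i with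
  | none => simp [PySem.List.pyGetD, hx]
  | some r =>
    have hr : r ∈ xs := PySem.List.mem_of_pyGet?_eq_some (x := r) (xs := xs) (i := i) hx
    simp [PySem.List.pyGetD, hx, h r hr]

lemma solve_deg (min_l n : Int) (hn : n ≤ 0) : solve min_l n = 1 := by
  show ((PySem.List.pyRange 0 (n + 1) 1).map
    (fun i => (PySem.List.pyGetD
      ((PySem.List.pyRange (n - 1) (-1) (-1)).foldl _
        ((PySem.List.pyRange 0 (n + 1) 1).map (fun _ => List.replicate n.toNat (0 : Int))))
      i ([] : List Int)).sum)).sum + 1 = 1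
  rw [show PySem.List.pyRange (n - 1) (-1) (-1) = [] from
        PySem.List.pyRange_neg_one_eq_nil (by omega), List.foldl_nil]
  have h0 : ∀ r ∈ (PySem.List.pyRange 0 (n + 1) 1).map
      (fun _ => List.replicate n.toNat (0 : Int)), r = ([] : List Int) := by
    intro r hr
    rw [List.mem_map] at hr
    obtain ⟨x, _, rfl⟩ := hr
    rw [show n.toNat = 0 from by omega, List.replicate_zero]
  have : ((PySem.List.pyRange 0 (n + 1) 1).map
      (fun i => (PySem.List.pyGetD
        ((PySem.List.pyRange 0 (n + 1) 1).map (fun _ => List.replicate n.toNat (0 : Int)))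
        i ([] : List Int)).sum)).sum = 0 := by
    apply List.sum_eq_zero
    intro x hx
    rw [List.mem_map] at hx
    obtain ⟨y, _, rfl⟩ := hx
    rw [pyGetD_all_nil _ _ h0, List.sum_nil]
  rw [this]
  norm_num

lemma solve_alt_deg (min_l n : Int) (hn : n ≤ 0) : solve_alt min_l n = 1 := by
  show ((PySem.List.pyRange (n - 1) (-1) (-1)).foldl _
      ((0 : Int), List.replicate (if (0 : Int) ≤ n then n + 2 else 0).toNat (0 : Int))).1 + 1 = 1
  rw [show PySem.List.pyRange (n - 1) (-1) (-1) = [] from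
        PySem.List.pyRange_neg_one_eq_nil (by omega), List.foldl_nil]
  norm_num

-- ===== VERDICT (by name: the statement is the Claim_ definition above) =====
theorem solve_spec : Claim_equal_solve := by
  intro min_l n _hdom hpre
  unfold Spec_solve
  by_cases hn : n ≤ 0
  · rw [solve_deg min_l n hn, solve_alt_deg min_l n hn]
  · have hm : 0 ≤ min_l := by rcases hpre with h | h; exact h; omega
    rw [solve_eq min_l n hm (by omega), solve_alt_eq min_l n hm (by omega)]
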